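-- pv_equiv track=rewrite | github.com/jiminkyung/Algorithm | Lv2/최솟값 만들기.py | solution
-- ===== SOURCE A (Python) =====
-- def solution(A, B):
--     ret = 0
--     while A and B:
--         a, b = min(A), max(B)
--         ret += a*b
--         A.pop(A.index(a))
--         B.pop(B.index(b))
--     return ret
-- ===== SOURCE B (Python) =====
-- def solution(A, B):
--     return sum(a * b for a, b in zip(sorted(A), sorted(B, reverse=True)))
-- ===== Notes on version B (the rewrite author's own statement) =====
-- stated objective: faster
-- what changed: Replaced the repeated min/max scan-and-pop loop by sorting A ascending and B descending once and summing pairwise products over zip.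
import Mathlib
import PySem

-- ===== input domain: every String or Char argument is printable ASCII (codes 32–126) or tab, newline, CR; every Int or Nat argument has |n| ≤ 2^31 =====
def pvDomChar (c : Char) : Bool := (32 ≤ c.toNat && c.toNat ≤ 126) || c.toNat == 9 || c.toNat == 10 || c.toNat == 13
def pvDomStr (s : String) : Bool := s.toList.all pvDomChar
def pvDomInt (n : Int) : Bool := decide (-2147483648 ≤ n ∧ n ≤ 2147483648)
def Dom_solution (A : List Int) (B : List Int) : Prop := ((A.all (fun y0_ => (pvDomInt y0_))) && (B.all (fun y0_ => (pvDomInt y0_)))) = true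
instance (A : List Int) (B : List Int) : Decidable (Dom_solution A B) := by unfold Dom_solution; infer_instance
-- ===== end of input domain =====

-- ===== PORT A =====
-- B changes the algorithm (sort once instead of repeated min/max scans); note: Python A pops from
-- its argument lists in place — the equivalence proved here is about the RETURN value only.

-- A.pop(A.index(a)): remove the first occurrence of a (totalized: unreachable branches return xs)
def pyPopIndex (xs : List Int) (a : Int) : List Int :=
  match PySem.List.index? xs a with
  | some i => (((PySem.List.pop? xs (i : Int)).map Prod.snd).getD xs)
  | none => xs

-- the while loop, with fuel = |A| (each iteration pops one element of A)
def solutionGo : Nat → List Int → List Int → Int → Int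
  | 0, _, _, ret => ret
  | fuel+1, A, B, ret =>
    if A ≠ [] ∧ B ≠ [] then
      match PySem.List.min? A (fun x => x), PySem.List.max? B (fun x => x) with
      | some a, some b => solutionGo fuel (pyPopIndex A a) (pyPopIndex B b) (ret + a * b)
      | _, _ => ret
    else ret

def solution (A : List Int) (B : List Int) : Int := solutionGo A.length A B 0

-- ===== PORT B =====
-- sum(a*b for a, b in zip(sorted(A), sorted(B, reverse=True)))
def solution_alt (A : List Int) (B : List Int) : Int :=
  (((PySem.List.sorted A (fun x => x) false).zip
      (PySem.List.sorted B (fun x => x) true)).map (fun p => p.1 * p.2)).sum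

-- ===== PRECONDITION & SPEC =====
def Spec_solution (A : List Int) (B : List Int) (out : Int) : Prop := out = solution_alt A B
instance (A : List Int) (B : List Int) (out : Int) : Decidable (Spec_solution A B out) := by unfold Spec_solution; infer_instance

-- ===== CLAIM (what is proved, stated in full; the proofs are below) =====
def Claim_equal_solution : Prop := ∀ (A : List Int) (B : List Int), Dom_solution A B → Spec_solution A B (solution A B)

-- ===== LEMMAS AND PROOFS =====

-- pop(index(a)) is erasure of the first occurrence of the value a
theorem pyPopIndex_eq_erase (xs : List Int) (a : Int) (ha : a ∈ xs) :
    pyPopIndex xs a = xs.erase a := by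
  obtain ⟨k, hk⟩ := Option.isSome_iff_exists.mp ((PySem.List.index?_isSome_iff xs a).mpr ha)
  obtain ⟨pre, suf, hxs, hlen, hnot⟩ := (PySem.List.index?_eq_some_iff xs a k).mp hk
  obtain ⟨hklt, -, -⟩ := PySem.List.getElem_of_index?_eq_some hk
  unfold pyPopIndex
  rw [hk]
  simp only [PySem.List.pop?_natCast xs k hklt, Option.map_some, Option.getD_some]
  subst hxs hlen
  rw [List.erase_append_right _ hnot]
  simp [List.eraseIdx_append_of_length_le (le_refl pre.length)]

-- head of sorted(xs) is the minimum, tail is sorted(xs minus it)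
theorem sorted_min_cons (xs : List Int) (a : Int) (ha : a ∈ xs)
    (hmin : ∀ y ∈ xs, a ≤ y) :
    PySem.List.sorted xs (fun x => x) false = a :: PySem.List.sorted (xs.erase a) (fun x => x) false := by
  refine PySem.List.eq_of_perm_of_pairwise_le_of_injective (fun x => x) (fun _ _ h => h) ?_ ?_ ?_
  · exact (PySem.List.sorted_perm xs _ _).trans
      ((xs.perm_cons_erase ha).trans ((PySem.List.sorted_perm (xs.erase a) (fun x => x) false).cons a).symm)
  · exact PySem.List.sorted_pairwise xs _
  · refine List.pairwise_cons.mpr ⟨?_, PySem.List.sorted_pairwise _ _⟩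
    intro y hy
    exact hmin y (xs.erase_subset ((PySem.List.mem_sorted _ _ _ _).mp hy))

-- head of sorted(xs, reverse=True) is the maximum, tail is the reverse-sort of the rest
theorem sorted_max_cons (xs : List Int) (b : Int) (hb : b ∈ xs)
    (hmax : ∀ y ∈ xs, y ≤ b) :
    PySem.List.sorted xs (fun x => x) true = b :: PySem.List.sorted (xs.erase b) (fun x => x) true := by
  refine PySem.List.eq_of_perm_of_pairwise_le_of_injective (fun x => -x) neg_injective ?_ ?_ ?_
  · exact (PySem.List.sorted_perm xs _ _).trans
      ((xs.perm_cons_erase hb).trans ((PySem.List.sorted_perm (xs.erase b) (fun x => x) true).cons b).symm)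
  · have := PySem.List.sorted_pairwise_rev xs (fun x : Int => x)
    exact this.imp (by intro c d h; simpa using h)
  · refine List.pairwise_cons.mpr ?_
    constructor
    · intro y hy
      simpa using hmax y (xs.erase_subset ((PySem.List.mem_sorted _ _ _ _).mp hy))
    · exact (PySem.List.sorted_pairwise_rev _ _).imp (by intro c d h; simpa using h)

theorem solutionGo_eq (fuel : Nat) :
    ∀ (A B : List Int) (ret : Int), A.length ≤ fuel →
      solutionGo fuel A B ret = ret + solution_alt A B := by
  induction fuel with
  | zero =>
    intro A B ret h
    have hA : A = [] := List.length_eq_zero_iff.mp (Nat.le_zero.mp h)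
    subst hA
    simp [solutionGo, solution_alt, PySem.List.sorted]
  | succ fuel ih =>
    intro A B ret h
    by_cases hA : A = []
    · subst hA; simp [solutionGo, solution_alt, PySem.List.sorted]
    by_cases hB : B = []
    · subst hB
      simp [solutionGo, solution_alt, hA, PySem.List.sorted]
    have hma' : (PySem.List.min? A (fun x : Int => x)).isSome := by
      rw [Option.isSome_iff_ne_none, Ne, PySem.List.min?_eq_none_iff]; exact hA
    have hmb' : (PySem.List.max? B (fun x : Int => x)).isSome := by
      rw [Option.isSome_iff_ne_none, Ne, PySem.List.max?_eq_none_iff]; exact hB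
    obtain ⟨a, hma⟩ := Option.isSome_iff_exists.mp hma'
    obtain ⟨b, hmb⟩ := Option.isSome_iff_exists.mp hmb'
    have haA : a ∈ A := PySem.List.min?_mem hma
    have hbB : b ∈ B := PySem.List.max?_mem hmb
    have hstep : solutionGo (fuel + 1) A B ret
        = solutionGo fuel (A.erase a) (B.erase b) (ret + a * b) := by
      show (if A ≠ [] ∧ B ≠ [] then
          match PySem.List.min? A (fun x => x), PySem.List.max? B (fun x => x) with
          | some a, some b => solutionGo fuel (pyPopIndex A a) (pyPopIndex B b) (ret + a * b)
          | _, _ => ret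
        else ret) = _
      rw [if_pos ⟨hA, hB⟩, hma, hmb]
      rw [show (match some a, some b with
          | some a, some b => solutionGo fuel (pyPopIndex A a) (pyPopIndex B b) (ret + a * b)
          | _, _ => ret) = solutionGo fuel (pyPopIndex A a) (pyPopIndex B b) (ret + a * b) from rfl]
      rw [pyPopIndex_eq_erase A a haA, pyPopIndex_eq_erase B b hbB]
    have hlen : (A.erase a).length ≤ fuel := by
      rw [List.length_erase_of_mem haA]
      omega
    rw [hstep, ih _ _ _ hlen]
    have hsa := sorted_min_cons A a haA (PySem.List.min?_isMin hma)
    have hsb := sorted_max_cons B b hbB (PySem.List.max?_isMax hmb)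
    unfold solution_alt
    rw [hsa, hsb, List.zip_cons_cons, List.map_cons, List.sum_cons]
    ring

-- ===== VERDICT (by name: the statement is the Claim_ definition above) =====
theorem solution_spec : Claim_equal_solution := by
  intro A B _
  unfold Spec_solution solution
  exact (by simpa using solutionGo_eq A.length A B 0 (le_refl _))
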